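-- pv_equiv track=rewrite | github.com/rise-hash/matrix-mod-inverse | solve.py | calculateTao
-- ===== SOURCE A (Python) =====
-- def calculateTao(num):
--     # num=[]
--     ans = 0
--     for i in range(0, len(num) - 1):
--         for j in range(i + 1, len(num)):
--             if (num[j] < num[i]):
--                 ans += 1
--     ans = (-1) ** ans
--     return ans
-- ===== SOURCE B (Python) =====
-- def calculateTao(num):
--     # Count inversions with a merge sort (O(n log n)), return (-1)^parity.
--     def sort_count(a):
--         n = len(a)
--         if n < 2:
--             return a, 0
--         m = n // 2
--         left, cl = sort_count(a[:m])
--         right, cr = sort_count(a[m:])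
--         merged = []
--         c = cl + cr
--         i = j = 0
--         while i < len(left) and j < len(right):
--             if right[j] < left[i]:
--                 merged.append(right[j])
--                 j += 1
--                 c += len(left) - i
--             else:
--                 merged.append(left[i])
--                 i += 1
--         merged.extend(left[i:])
--         merged.extend(right[j:])
--         return merged, c
--     _, c = sort_count(num)
--     return 1 if c % 2 == 0 else -1
-- ===== Notes on version B (the rewrite author's own statement) =====
-- stated objective: faster
-- what changed: Replaces A's nested-loop pairwise scan with a merge sort that counts inversions during merging and returns (-1)^parity.
import Mathlib
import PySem

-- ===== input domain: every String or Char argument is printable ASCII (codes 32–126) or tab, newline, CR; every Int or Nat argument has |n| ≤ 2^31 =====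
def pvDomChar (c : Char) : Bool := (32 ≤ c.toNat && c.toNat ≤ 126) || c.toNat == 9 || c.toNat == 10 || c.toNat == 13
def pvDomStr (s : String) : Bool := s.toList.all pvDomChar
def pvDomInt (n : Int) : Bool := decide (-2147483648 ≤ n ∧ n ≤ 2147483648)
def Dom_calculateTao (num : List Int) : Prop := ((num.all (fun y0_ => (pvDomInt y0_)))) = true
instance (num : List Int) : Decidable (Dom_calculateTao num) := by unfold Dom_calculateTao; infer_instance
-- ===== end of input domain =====

-- B replaces A's O(n^2) nested-loop inversion count with a merge sort that counts
-- inversions and takes the parity at the end.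

-- ===== PORT A =====
-- literal port of A's nested index loops; 'ans' is always ≥ 0 in Python, so '(-1) ** ans' is (-1)^ans.toNat
def calculateTao (num : List Int) : Int :=
  let ans : Int :=
    (PySem.List.pyRange 0 ((num.length : Int) - 1)).foldl (fun ans i =>
      (PySem.List.pyRange (i + 1) (num.length : Int)).foldl (fun ans j =>
        if PySem.List.pyGetD num j 0 < PySem.List.pyGetD num i 0 then ans + 1 else ans) ans) 0
  (-1 : Int) ^ ans.toNat

-- ===== PORT B =====
-- port of Source B's merge step: consumes the two runs like the Python while-loop
-- (plus the trailing extends), adding len(left) - i whenever the right element goes first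
def mergeCnt : List Int → List Int → List Int × Int
  | left, [] => (left, 0)
  | [], y :: r => (y :: r, 0)
  | x :: l, y :: r =>
    if y < x then
      let p := mergeCnt (x :: l) r
      (y :: p.1, p.2 + ((x :: l).length : Int))
    else
      let p := mergeCnt l (y :: r)
      (x :: p.1, p.2)
termination_by l r => l.length + r.length

-- port of Source B's sort_count: split at n // 2, recurse on both halves, merge
def sortCnt (a : List Int) : List Int × Int :=
  if a.length < 2 then (a, 0)
  else
    let m := a.length / 2
    let pl := sortCnt (a.take m)
    let pr := sortCnt (a.drop m)
    let pm := mergeCnt pl.1 pr.1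
    (pm.1, pl.2 + pr.2 + pm.2)
termination_by a.length
decreasing_by
  · simp only [List.length_take]; omega
  · simp only [List.length_drop]; omega

def calculateTao_alt (num : List Int) : Int :=
  if PySem.Int.mod (sortCnt num).2 2 = 0 then 1 else -1

-- ===== PRECONDITION & SPEC =====
def Spec_calculateTao (num : List Int) (out : Int) : Prop := out = calculateTao_alt num
instance (num : List Int) (out : Int) : Decidable (Spec_calculateTao num out) := by unfold Spec_calculateTao; infer_instance

-- ===== CLAIM (what is proved, stated in full; the proofs are below) =====
def Claim_equal_calculateTao : Prop := ∀ (num : List Int), Dom_calculateTao num → Spec_calculateTao num (calculateTao num)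

-- ===== LEMMAS AND PROOFS =====

-- the number of inversions of a list, structurally
def invCount : List Int → Nat
  | [] => 0
  | x :: xs => xs.countP (fun y => decide (y < x)) + invCount xs

-- cross inversions between two blocks: pairs (x from l, y from r) with y < x
def cross (l r : List Int) : Int :=
  (l.map (fun x => ((r.countP (fun y => decide (y < x)) : Nat) : Int))).sum

theorem cross_perm {l l' r r' : List Int} (hl : l.Perm l') (hr : r.Perm r') :
    cross l r = cross l' r' := by
  unfold cross
  rw [List.Perm.sum_eq (hl.map _)]
  congr 1
  refine List.map_congr_left ?_
  intro x _
  rw [hr.countP_eq]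

theorem invCount_append (t d : List Int) :
    (invCount (t ++ d) : Int) = (invCount t : Int) + (invCount d : Int) + cross t d := by
  induction t with
  | nil => simp [invCount, cross]
  | cons x t ih =>
    simp only [List.cons_append, invCount, List.countP_append, cross, List.map_cons,
      List.sum_cons] at *
    push_cast
    rw [ih]
    ring

theorem mergeCnt_perm (l r : List Int) : (mergeCnt l r).1.Perm (l ++ r) := by
  fun_induction mergeCnt l r with
  | case1 left => simp
  | case2 y r => simp
  | case3 x l y r hlt p ih => exact (ih.cons y).trans List.perm_middle.symm
  | case4 x l y r hlt p ih => exact ih.cons x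

theorem mergeCnt_sorted {l r : List Int} (hl : l.Pairwise (· ≤ ·)) (hr : r.Pairwise (· ≤ ·)) :
    (mergeCnt l r).1.Pairwise (· ≤ ·) := by
  fun_induction mergeCnt l r with
  | case1 left => exact hl
  | case2 y r => exact hr
  | case3 x l y r hlt p ih =>
    rw [List.pairwise_cons] at hr
    refine List.pairwise_cons.mpr ⟨?_, ih hl hr.2⟩
    intro z hz
    have hz' : z ∈ (x :: l) ++ r := (mergeCnt_perm (x :: l) r).subset hz
    rcases List.mem_append.mp hz' with h | h
    · rcases List.mem_cons.mp h with rfl | h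
      · exact le_of_lt hlt
      · exact le_trans (le_of_lt hlt) ((List.pairwise_cons.mp hl).1 z h)
    · exact hr.1 z h
  | case4 x l y r hlt p ih =>
    rw [List.pairwise_cons] at hl
    refine List.pairwise_cons.mpr ⟨?_, ih hl.2 hr⟩
    intro z hz
    have hz' : z ∈ l ++ (y :: r) := (mergeCnt_perm l (y :: r)).subset hz
    rcases List.mem_append.mp hz' with h | h
    · exact hl.1 z h
    · rcases List.mem_cons.mp h with rfl | h
      · exact le_of_not_gt hlt
      · exact le_trans (le_of_not_gt hlt) ((List.pairwise_cons.mp hr).1 z h)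

-- on sorted runs, the merge's counter is exactly the number of cross inversions
theorem mergeCnt_cross {l r : List Int} (hl : l.Pairwise (· ≤ ·)) (hr : r.Pairwise (· ≤ ·)) :
    (mergeCnt l r).2 = cross l r := by
  fun_induction mergeCnt l r with
  | case1 left => simp [cross]
  | case2 y r => simp [cross]
  | case3 x l y r hlt p ih =>
    rw [List.pairwise_cons] at hr
    show (mergeCnt (x :: l) r).2 + ((x :: l).length : Int) = cross (x :: l) (y :: r)
    rw [ih hl hr.2]
    unfold cross
    have key : ∀ z ∈ x :: l, ((y :: r).countP (fun w => decide (w < z)) : Int)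
        = (r.countP (fun w => decide (w < z)) : Int) + 1 := by
      intro z hz
      have hyz : y < z := by
        rcases List.mem_cons.mp hz with rfl | h
        · exact hlt
        · exact lt_of_lt_of_le hlt ((List.pairwise_cons.mp hl).1 z h)
      rw [List.countP_cons]
      simp [hyz]
    rw [List.map_congr_left (fun z hz => key z hz)]
    rw [PySem.List.sum_map_add_int]
    simp
    ring
  | case4 x l y r hlt p ih =>
    rw [List.pairwise_cons] at hl
    show (mergeCnt l (y :: r)).2 = cross (x :: l) (y :: r)
    rw [ih hl.2 hr]
    unfold cross
    have h0 : (y :: r).countP (fun w => decide (w < x)) = 0 := by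
      rw [List.countP_eq_zero]
      intro w hw
      rcases List.mem_cons.mp hw with rfl | h
      · simpa using not_lt.mpr (le_of_not_gt hlt)
      · simpa using not_lt.mpr (le_trans (le_of_not_gt hlt) ((List.pairwise_cons.mp hr).1 w h))
    simp [h0]

-- Source B's sort_count sorts its input and returns exactly the inversion count
theorem sortCnt_perm_sorted (a : List Int) :
    (sortCnt a).1.Perm a ∧ (sortCnt a).1.Pairwise (· ≤ ·) ∧ (sortCnt a).2 = (invCount a : Int) := by
  fun_induction sortCnt a with
  | case1 a h =>
    rcases a with _ | ⟨x, _ | ⟨y, t⟩⟩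
    · exact ⟨List.Perm.refl _, by simp, by simp [invCount]⟩
    · exact ⟨List.Perm.refl _, by simp, by simp [invCount]⟩
    · simp at h
  | case2 a h m pl pr pm ih1 ih2 =>
    obtain ⟨hp1, hs1, hc1⟩ := ih1
    obtain ⟨hp2, hs2, hc2⟩ := ih2
    refine ⟨?_, mergeCnt_sorted hs1 hs2, ?_⟩
    · exact (mergeCnt_perm pl.1 pr.1).trans ((hp1.append hp2).trans (by rw [List.take_append_drop]))
    · show pl.2 + pr.2 + pm.2 = (invCount a : Int)
      have := invCount_append (a.take m) (a.drop m)
      rw [List.take_append_drop] at this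
      rw [mergeCnt_cross hs1 hs2, cross_perm hp1 hp2, hc1, hc2, this]

-- sum-over-suffixes form of the inversion count
theorem sumC (num : List Int) :
    ((List.range num.length).map
      (fun k => ((num.drop (k+1)).countP (fun y => decide (y < num.getD k 0)) : Int))).sum
    = (invCount num : Int) := by
  induction num with
  | nil => simp [invCount]
  | cons x xs ih =>
    rw [show (x :: xs).length = xs.length + 1 from rfl, List.range_succ_eq_map]
    simp only [List.map_cons, List.map_map, List.sum_cons]
    have : ((List.range xs.length).map
        ((fun k => (((x :: xs).drop (k+1)).countP (fun y => decide (y < (x :: xs).getD k 0)) : Int)) ∘ Nat.succ))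
      = (List.range xs.length).map
        (fun k => ((xs.drop (k+1)).countP (fun y => decide (y < xs.getD k 0)) : Int)) := by
      refine List.map_congr_left ?_
      intro k _
      rfl
    rw [this, ih]
    simp [invCount]

-- A's double loop computes the inversion count
theorem calcA_count (num : List Int) :
    (PySem.List.pyRange 0 ((num.length : Int) - 1)).foldl (fun ans i =>
      (PySem.List.pyRange (i + 1) (num.length : Int)).foldl (fun ans j =>
        if PySem.List.pyGetD num j 0 < PySem.List.pyGetD num i 0 then ans + 1 else ans) ans) 0
    = (invCount num : Int) := by
  have hinner : ∀ (k : Nat) (a : Int),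
      (PySem.List.pyRange ((k : Int) + 1) (num.length : Int)).foldl (fun ans j =>
        if PySem.List.pyGetD num j 0 < PySem.List.pyGetD num (k : Int) 0 then ans + 1 else ans) a
      = a + ((num.drop (k+1)).countP (fun y => decide (y < num.getD k 0)) : Int) := by
    intro k a
    rw [PySem.List.foldl_pyRange_pyGetD' num 0
      (fun ans y => if y < PySem.List.pyGetD num (k : Int) 0 then ans + 1 else ans) a (by omega)]
    have h2 : ((k : Int) + 1).toNat = k + 1 := by omega
    rw [h2]
    have := PySem.List.foldl_count_if
      (fun y => decide (y < PySem.List.pyGetD num (k : Int) 0)) (num.drop (k+1)) a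
    simpa using this
  -- the outer range may be extended from n-1 to n: the extra inner range is empty
  have hext : (PySem.List.pyRange 0 ((num.length : Int) - 1)).foldl (fun ans i =>
      (PySem.List.pyRange (i + 1) (num.length : Int)).foldl (fun ans j =>
        if PySem.List.pyGetD num j 0 < PySem.List.pyGetD num i 0 then ans + 1 else ans) ans) (0 : Int)
    = (PySem.List.pyRange 0 (num.length : Int)).foldl (fun ans i =>
      (PySem.List.pyRange (i + 1) (num.length : Int)).foldl (fun ans j =>
        if PySem.List.pyGetD num j 0 < PySem.List.pyGetD num i 0 then ans + 1 else ans) ans) (0 : Int) := by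
    rcases Nat.eq_zero_or_pos num.length with h0 | hpos
    · rw [h0]; norm_num
    · have hsplit : PySem.List.pyRange 0 (num.length : Int)
          = PySem.List.pyRange 0 ((num.length : Int) - 1) ++ [(num.length : Int) - 1] := by
        have := PySem.List.pyRange_one_succ_right (a := 0) (b := (num.length : Int) - 1) (by omega)
        rw [show ((num.length : Int) - 1) + 1 = (num.length : Int) by ring] at this
        exact this
      rw [hsplit, List.foldl_append]
      simp only [List.foldl_cons, List.foldl_nil]
      rw [show PySem.List.pyRange (((num.length : Int) - 1) + 1) (num.length : Int) = []
        from PySem.List.pyRange_one_eq_nil (by omega)]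
      simp
  refine hext.trans ?_
  rw [PySem.List.pyRange_zero_nat, List.foldl_map]
  have houter : ∀ (l : List Nat) (a : Int),
      l.foldl (fun (ans : Int) (k : Nat) =>
        (PySem.List.pyRange ((k : Int) + 1) (num.length : Int)).foldl (fun ans j =>
          if PySem.List.pyGetD num j 0 < PySem.List.pyGetD num (k : Int) 0 then ans + 1 else ans) ans) a
      = a + (l.map (fun k => ((num.drop (k+1)).countP (fun y => decide (y < num.getD k 0)) : Int))).sum := by
    intro l
    induction l with
    | nil => intro a; simp
    | cons k l ih =>
      intro a
      rw [List.foldl_cons, ih, hinner]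
      simp
      ring
  rw [houter, sumC]
  simp

-- ===== VERDICT (by name: the statement is the Claim_ definition above) =====
theorem calculateTao_spec : Claim_equal_calculateTao := by
  intro num _
  show (let ans : Int :=
    (PySem.List.pyRange 0 ((num.length : Int) - 1)).foldl (fun ans i =>
      (PySem.List.pyRange (i + 1) (num.length : Int)).foldl (fun ans j =>
        if PySem.List.pyGetD num j 0 < PySem.List.pyGetD num i 0 then ans + 1 else ans) ans) 0
    (-1 : Int) ^ ans.toNat) = calculateTao_alt num
  simp only [calcA_count]
  unfold calculateTao_alt
  rw [(sortCnt_perm_sorted num).2.2]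
  have hm : PySem.Int.mod ((invCount num : Nat) : Int) 2 = ((invCount num % 2 : Nat) : Int) := by
    exact_mod_cast PySem.Int.mod_natCast (invCount num) 2
  rw [Int.toNat_natCast, hm]
  rcases Nat.even_or_odd (invCount num) with h | h
  · rw [Even.neg_one_pow h]
    have h0 : invCount num % 2 = 0 := Nat.even_iff.mp h
    simp [h0]
  · rw [Odd.neg_one_pow h]
    have h1 : invCount num % 2 = 1 := Nat.odd_iff.mp h
    simp [h1]
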